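-- pv_equiv track=rewrite | github.com/ivanmeranovich/SoberRBS | Sober.py | is_valid_candidate
-- ===== SOURCE A (Python) =====
-- def is_valid_candidate(candidate_start, candidate_end, cds_intervals, threshold=40):
--     """
--     Проверяет, проходит ли кандидат следующие условия:
--       1. Если кандидат полностью находится внутри любого CDS, он не подходит.
--       2. Минимальное расстояние от кандидата до ближайшей границы CDS (начало или конец)
--          должно быть не более threshold нуклеотидов.
--
--     Возвращает кортеж (valid, min_distance),
--       где valid – True, если кандидат допустим, а min_distance – минимальное расстояние до ближайшей границы CDS.
--     """
--     # Если в геноме нет CDS, условие считается невыполненным – кандидат не аннотируется.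
--     if not cds_intervals:
--         return False, None
--
--     # Если кандидат целиком находится внутри CDS, исключаем его.
--     for (cds_start, cds_end) in cds_intervals:
--         if candidate_start >= cds_start and candidate_end <= cds_end:
--             return False, 0
--
--     # Вычисляем минимальное расстояние до ближайшей границы CDS для каждого интервала.
--     min_distance = None
--     for (cds_start, cds_end) in cds_intervals:
--         if candidate_end <= cds_start:
--             dist = cds_start - candidate_end
--         elif candidate_start >= cds_end:
--             dist = candidate_start - cds_end
--         else:
--             # Этот случай не должен возникать, так как при пересечении кандидат уже исключён.
--             dist = 0
--         if min_distance is None or dist < min_distance: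
--             min_distance = dist
--
--     if min_distance is not None and min_distance <= threshold:
--         return True, min_distance
--     return False, min_distance
-- ===== SOURCE B (Python) =====
-- def _gap(candidate_start, candidate_end, cds_start, cds_end):
--     # distance from the candidate to this CDS interval (0 on overlap)
--     if candidate_end <= cds_start:
--         return cds_start - candidate_end
--     if candidate_start >= cds_end:
--         return candidate_start - cds_end
--     return 0
--
--
-- def is_valid_candidate(candidate_start, candidate_end, cds_intervals, threshold=40):
--     if not cds_intervals:
--         return False, None
--     min_distance = None
--     for cds_start, cds_end in cds_intervals:
--         if cds_start <= candidate_start and candidate_end <= cds_end: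
--             return False, 0
--         dist = _gap(candidate_start, candidate_end, cds_start, cds_end)
--         if min_distance is None or dist < min_distance:
--             min_distance = dist
--     return (min_distance <= threshold), min_distance
-- ===== Notes on version B (the rewrite author's own statement) =====
-- stated objective: simpler
-- what changed: Collapses A's two separate traversals (containment scan, then distance scan) and final None-guarded threshold branch into a single pass that early-returns on containment and maintains a running minimum gap via a small helper, ending with one direct comparison.
import Mathlib
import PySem

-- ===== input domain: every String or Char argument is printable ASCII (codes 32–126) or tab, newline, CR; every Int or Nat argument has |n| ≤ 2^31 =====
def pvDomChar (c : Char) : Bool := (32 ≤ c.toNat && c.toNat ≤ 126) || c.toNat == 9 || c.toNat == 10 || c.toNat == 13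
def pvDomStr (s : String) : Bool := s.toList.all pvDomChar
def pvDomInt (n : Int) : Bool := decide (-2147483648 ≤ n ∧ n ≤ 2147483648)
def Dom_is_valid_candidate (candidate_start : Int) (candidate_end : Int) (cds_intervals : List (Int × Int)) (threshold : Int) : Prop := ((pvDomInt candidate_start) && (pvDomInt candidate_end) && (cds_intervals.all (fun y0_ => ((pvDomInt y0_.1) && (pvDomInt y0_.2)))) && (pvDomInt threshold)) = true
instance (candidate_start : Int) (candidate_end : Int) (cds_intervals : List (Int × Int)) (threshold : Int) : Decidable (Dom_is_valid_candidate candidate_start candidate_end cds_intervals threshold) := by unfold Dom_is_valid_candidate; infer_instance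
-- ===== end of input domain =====

-- B merges A's two sequential traversals into a single pass (early return on containment,
-- running minimum gap via a helper) — objective: simpler; return values are identical.

-- ===== PORT A =====
-- A's first loop: does some CDS interval fully contain the candidate?
def pvA_loop1 (candidate_start : Int) (candidate_end : Int) : List (Int × Int) → Bool
  | [] => false
  | (cds_start, cds_end) :: rest =>
      if candidate_start ≥ cds_start ∧ candidate_end ≤ cds_end then true
      else pvA_loop1 candidate_start candidate_end rest

-- A's second loop: running minimum of the per-interval distance, accumulator starts at None.
def pvA_loop2 (candidate_start : Int) (candidate_end : Int) : List (Int × Int) → Option Int → Option Int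
  | [], acc => acc
  | (cds_start, cds_end) :: rest, acc =>
      let dist : Int :=
        if candidate_end ≤ cds_start then cds_start - candidate_end
        else if candidate_start ≥ cds_end then candidate_start - cds_end
        else 0
      let acc' : Option Int :=
        match acc with
        | none => some dist
        | some m => if dist < m then some dist else some m
      pvA_loop2 candidate_start candidate_end rest acc'

def is_valid_candidate (candidate_start : Int) (candidate_end : Int) (cds_intervals : List (Int × Int)) (threshold : Int) : Bool × Option Int :=
  if cds_intervals = [] then (false, none)
  else if pvA_loop1 candidate_start candidate_end cds_intervals then (false, some 0)
  else
    match pvA_loop2 candidate_start candidate_end cds_intervals none with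
    | some m => if m ≤ threshold then (true, some m) else (false, some m)
    | none => (false, none)

-- ===== PORT B =====
-- Source B's _gap helper
def pvGap (candidate_start : Int) (candidate_end : Int) (cds_start : Int) (cds_end : Int) : Int :=
  if candidate_end ≤ cds_start then cds_start - candidate_end
  else if candidate_start ≥ cds_end then candidate_start - cds_end
  else 0

-- Source B's single loop: early return on containment, running minimum otherwise;
-- the final '(min_distance <= threshold), min_distance': the none case is unreachable
-- (the loop is entered with a nonempty list), rendered as (false, none).
def pvB_scan (candidate_start : Int) (candidate_end : Int) (threshold : Int) : List (Int × Int) → Option Int → Bool × Option Int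
  | [], min_distance =>
      match min_distance with
      | some m => (decide (m ≤ threshold), some m)
      | none => (false, none)
  | (cds_start, cds_end) :: rest, min_distance =>
      if cds_start ≤ candidate_start ∧ candidate_end ≤ cds_end then (false, some 0)
      else
        let dist := pvGap candidate_start candidate_end cds_start cds_end
        let min_distance' : Option Int :=
          match min_distance with
          | none => some dist
          | some m => if dist < m then some dist else some m
        pvB_scan candidate_start candidate_end threshold rest min_distance'

def is_valid_candidate_alt (candidate_start : Int) (candidate_end : Int) (cds_intervals : List (Int × Int)) (threshold : Int) : Bool × Option Int :=
  if cds_intervals = [] then (false, none)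
  else pvB_scan candidate_start candidate_end threshold cds_intervals none

-- ===== PRECONDITION & SPEC =====
def Spec_is_valid_candidate (candidate_start : Int) (candidate_end : Int) (cds_intervals : List (Int × Int)) (threshold : Int) (out : Bool × Option Int) : Prop := out = is_valid_candidate_alt candidate_start candidate_end cds_intervals threshold
instance (candidate_start : Int) (candidate_end : Int) (cds_intervals : List (Int × Int)) (threshold : Int) (out : Bool × Option Int) : Decidable (Spec_is_valid_candidate candidate_start candidate_end cds_intervals threshold out) := by unfold Spec_is_valid_candidate; infer_instance

-- ===== CLAIM (what is proved, stated in full; the proofs are below) =====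
def Claim_equal_is_valid_candidate : Prop := ∀ (candidate_start : Int) (candidate_end : Int) (cds_intervals : List (Int × Int)) (threshold : Int), Dom_is_valid_candidate candidate_start candidate_end cds_intervals threshold → Spec_is_valid_candidate candidate_start candidate_end cds_intervals threshold (is_valid_candidate candidate_start candidate_end cds_intervals threshold)

-- ===== LEMMAS AND PROOFS =====

-- A's final step as a function of the accumulated minimum.
def pvFinal (threshold : Int) : Option Int → Bool × Option Int
  | some m => if m ≤ threshold then (true, some m) else (false, some m)
  | none => (false, none)

-- The merged single pass equals: containment test first, then min-fold then finalize.
theorem pvB_scan_eq (cs ce th : Int) : ∀ (ivs : List (Int × Int)) (md : Option Int),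
    pvB_scan cs ce th ivs md =
      if pvA_loop1 cs ce ivs then (false, some 0)
      else pvFinal th (pvA_loop2 cs ce ivs md) := by
  intro ivs
  induction ivs with
  | nil =>
      intro md
      cases md <;> simp [pvB_scan, pvA_loop1, pvA_loop2, pvFinal]
      split <;> simp_all
  | cons hd tl ih =>
      intro md
      obtain ⟨s, e⟩ := hd
      by_cases h : s ≤ cs ∧ ce ≤ e
      · simp [pvB_scan, pvA_loop1, h, ge_iff_le]
      · have h' : ¬ (cs ≥ s ∧ ce ≤ e) := by
          simpa [ge_iff_le, and_comm] using h
        simp only [pvB_scan, pvA_loop1, pvA_loop2, pvGap, if_neg h]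
        exact ih _

-- ===== VERDICT (by name: the statement is the Claim_ definition above) =====
theorem is_valid_candidate_spec : Claim_equal_is_valid_candidate := by
  intro cs ce ivs th _
  unfold Spec_is_valid_candidate is_valid_candidate is_valid_candidate_alt
  by_cases hnil : ivs = []
  · simp [hnil]
  · simp only [hnil, if_false, pvB_scan_eq]
    split
    · rfl
    · rfl
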